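-- pv_equiv track=rewrite | github.com/jjimly/Coding | Task II : Find a suitable location path/Solution_without_BFS.py | solution
-- ===== SOURCE A (Python) =====
-- def absolute_distance(x1, y1, x2, y2):
--     return abs(x1 - x2) + abs(y1 - y2)
--
-- def solution(K, A):
--     N = len(A)  # 獲取矩陣的行數
--     M = len(A[0])  # 獲取矩陣的列數
--
--     houses = []
--     empty_plots = []
--
--     # 遍歷矩陣，找到所有房屋和空地的坐標
--     for i in range(N):
--         for j in range(M):
--             if A[i][j] == 1:
--                 houses.append((i, j))
--             elif A[i][j] == 0:
--                 empty_plots.append((i, j))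
--
--     suitable_locations = 0
--
--     # 對於每個空地，檢查到每個房屋的距離
--     for empty_plot in empty_plots:
--         x, y = empty_plot  # 取出空地的坐標
--         all_within_distance = True  # 假設該空地符合條件
--
--         for house in houses:
--             hx, hy = house  # 取出房屋的坐標
--             distance = absolute_distance(x, y, hx, hy)  # 計算絕對值距離
--             if distance > K:  # 如果距離超過 K，則不符合條件
--                 all_within_distance = False
--                 break
--
--         if all_within_distance:
--             suitable_locations += 1
--
--     return suitable_locations
-- ===== SOURCE B (Python) =====
-- def _upd(b, s, d):
--     if b is None:
--         return (s, s, d, d)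
--     smin, smax, dmin, dmax = b
--     if s < smin: smin = s
--     if s > smax: smax = s
--     if d < dmin: dmin = d
--     if d > dmax: dmax = d
--     return (smin, smax, dmin, dmax)
--
-- def _ok(K, s, d, b):
--     if b is None:
--         return True
--     smin, smax, dmin, dmax = b
--     return smax - s <= K and s - smin <= K and dmax - d <= K and d - dmin <= K
--
-- def solution(K, A):
--     M = len(A[0])
--     # One pass: Chebyshev bounds (min/max of i+j and i-j) over all houses.
--     b = None
--     for i, row in enumerate(A):
--         for j in range(M):
--             if row[j] == 1:
--                 b = _upd(b, i + j, i - j)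
--     # Second pass: O(1) bounds check per empty plot.
--     count = 0
--     for i, row in enumerate(A):
--         for j in range(M):
--             if row[j] == 0:
--                 if _ok(K, i + j, i - j, b):
--                     count += 1
--     return count
-- ===== Notes on version B (the rewrite author's own statement) =====
-- stated objective: alternative
-- what changed: Replaced the per-empty-plot scan over all houses by a Manhattan-to-Chebyshev rotation: one pass records min/max of i+j and i-j over houses, then each empty plot is a four-bound check against those extrema.
import Mathlib
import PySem

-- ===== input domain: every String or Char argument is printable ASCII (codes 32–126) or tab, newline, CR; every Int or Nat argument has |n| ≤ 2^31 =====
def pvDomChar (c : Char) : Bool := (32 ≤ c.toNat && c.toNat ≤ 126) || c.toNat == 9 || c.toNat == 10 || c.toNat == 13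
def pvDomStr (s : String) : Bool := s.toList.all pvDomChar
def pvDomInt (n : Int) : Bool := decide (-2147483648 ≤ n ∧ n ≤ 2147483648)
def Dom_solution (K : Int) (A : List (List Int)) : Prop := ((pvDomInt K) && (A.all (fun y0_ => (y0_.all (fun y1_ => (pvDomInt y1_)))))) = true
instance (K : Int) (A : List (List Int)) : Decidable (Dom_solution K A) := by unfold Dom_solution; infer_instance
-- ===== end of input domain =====

-- B replaces A's per-empty-plot scan over all houses by a Manhattan→Chebyshev rotation:
-- one pass records min/max of i+j and i-j over houses, then each empty plot is a four-bound check.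


-- ===== PORT A =====
def absolute_distance (x1 y1 x2 y2 : Int) : Int := |x1 - x2| + |y1 - y2|

-- the inner 'for house in houses: … break' loop with its all_within_distance flag
def checkHouses (K x y : Int) : List (Int × Int) → Bool
  | [] => true
  | (hx, hy) :: rest =>
      if absolute_distance x y hx hy > K then false else checkHouses K x y rest

def solution (K : Int) (A : List (List Int)) : Int :=
  let N : Int := A.length
  let M : Int := (PySem.List.pyGetD A 0 []).length
  let hp : List (Int × Int) × List (Int × Int) :=
    (PySem.List.pyRange 0 N 1).foldl (fun st i =>
      (PySem.List.pyRange 0 M 1).foldl (fun st j =>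
        if PySem.List.pyGetD (PySem.List.pyGetD A i []) j 0 = 1 then (st.1 ++ [(i, j)], st.2)
        else if PySem.List.pyGetD (PySem.List.pyGetD A i []) j 0 = 0 then (st.1, st.2 ++ [(i, j)])
        else st) st) ([], [])
  hp.2.foldl (fun acc p => if checkHouses K p.1 p.2 hp.1 then acc + 1 else acc) 0

-- ===== PORT B =====
def updB (b : Option (Int × Int × Int × Int)) (s d : Int) : Option (Int × Int × Int × Int) :=
  match b with
  | none => some (s, s, d, d)
  | some (smin, smax, dmin, dmax) =>
      some ((if s < smin then s else smin), (if s > smax then s else smax),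
            (if d < dmin then d else dmin), (if d > dmax then d else dmax))

def okB (K s d : Int) (b : Option (Int × Int × Int × Int)) : Bool :=
  match b with
  | none => true
  | some (smin, smax, dmin, dmax) =>
      decide (smax - s ≤ K) && decide (s - smin ≤ K) && decide (dmax - d ≤ K) && decide (d - dmin ≤ K)

def solution_alt (K : Int) (A : List (List Int)) : Int :=
  let M : Int := (PySem.List.pyGetD A 0 []).length
  let b : Option (Int × Int × Int × Int) :=
    (PySem.List.enumerate A 0).foldl (fun b p =>
      (PySem.List.pyRange 0 M 1).foldl (fun b j =>
        if PySem.List.pyGetD p.2 j 0 = 1 then updB b (p.1 + j) (p.1 - j) else b) b) none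
  (PySem.List.enumerate A 0).foldl (fun cnt p =>
    (PySem.List.pyRange 0 M 1).foldl (fun cnt j =>
      if PySem.List.pyGetD p.2 j 0 = 0 then
        (if okB K (p.1 + j) (p.1 - j) b then cnt + 1 else cnt)
      else cnt) cnt) 0

-- ===== PRECONDITION & SPEC =====
-- Pre_ excludes exactly the inputs on which the Python A raises IndexError:
-- an empty matrix (A[0]) and rows shorter than the first row (A[i][j], j < len(A[0])).
def Pre_solution (K : Int) (A : List (List Int)) : Prop :=
  A ≠ [] ∧ ∀ row ∈ A, (A.headD []).length ≤ row.length
instance (K : Int) (A : List (List Int)) : Decidable (Pre_solution K A) := by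
  unfold Pre_solution; infer_instance

def pvWitness_solution : Int × List (List Int) := (2, [[1, 0], [0, 0]])

def Spec_solution (K : Int) (A : List (List Int)) (out : Int) : Prop := out = solution_alt K A
instance (K : Int) (A : List (List Int)) (out : Int) : Decidable (Spec_solution K A out) := by
  unfold Spec_solution; infer_instance

-- ===== CLAIM (what is proved, stated in full; the proofs are below) =====
def Claim_equal_solution : Prop := ∀ (K : Int) (A : List (List Int)), Dom_solution K A → Pre_solution K A → Spec_solution K A (solution K A)


-- ===== LEMMAS AND PROOFS =====

-- proof-side canonical lists of house / empty coordinates and fold shapes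
def withinB (K x y : Int) (p : Int × Int) : Bool := decide (absolute_distance x y p.1 p.2 ≤ K)

def hCells (i : Int) (r : List Int) (js : List Int) : List (Int × Int) :=
  (js.filter (fun j => decide (PySem.List.pyGetD r j 0 = 1))).map (fun j => (i, j))

def eCells (i : Int) (r : List Int) (js : List Int) : List (Int × Int) :=
  (js.filter (fun j => !decide (PySem.List.pyGetD r j 0 = 1) && decide (PySem.List.pyGetD r j 0 = 0))).map
    (fun j => (i, j))

def housesOf (A : List (List Int)) (M : Int) : List (Int × Int) :=
  (PySem.List.pyRange 0 (A.length : Int) 1).flatMap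
    (fun i => hCells i (PySem.List.pyGetD A i []) (PySem.List.pyRange 0 M 1))

def emptiesOf (A : List (List Int)) (M : Int) : List (Int × Int) :=
  (PySem.List.pyRange 0 (A.length : Int) 1).flatMap
    (fun i => eCells i (PySem.List.pyGetD A i []) (PySem.List.pyRange 0 M 1))

def hUpd (b : Option (Int × Int × Int × Int)) (p : Int × Int) : Option (Int × Int × Int × Int) :=
  updB b (p.1 + p.2) (p.1 - p.2)

lemma checkHouses_eq_all (K x y : Int) (hs : List (Int × Int)) :
    checkHouses K x y hs = hs.all (withinB K x y) := by
  induction hs with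
  | nil => rfl
  | cons h t ih =>
      obtain ⟨hx, hy⟩ := h
      by_cases hgt : absolute_distance x y hx hy > K
      · simp [checkHouses, hgt, withinB, not_le.mpr hgt]
      · simp [checkHouses, hgt, withinB, not_lt.mp hgt, ih]

lemma okB_upd (K x y hx hy : Int) (b : Option (Int × Int × Int × Int)) :
    okB K (x + y) (x - y) (updB b (hx + hy) (hx - hy))
      = (okB K (x + y) (x - y) b && withinB K x y (hx, hy)) := by
  cases b with
  | none =>
      simp only [okB, updB, withinB, absolute_distance, Bool.true_and]
      rw [Bool.eq_iff_iff]
      simp only [Bool.and_eq_true, decide_eq_true_eq, Int.abs_eq_natAbs]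
      omega
  | some q =>
      obtain ⟨s0, s1, d0, d1⟩ := q
      simp only [okB, updB, withinB, absolute_distance]
      rw [Bool.eq_iff_iff]
      simp only [Bool.and_eq_true, decide_eq_true_eq, Int.abs_eq_natAbs]
      split_ifs <;> omega

lemma okB_foldl (K x y : Int) (hs : List (Int × Int)) (b : Option (Int × Int × Int × Int)) :
    okB K (x + y) (x - y) (hs.foldl hUpd b)
      = (okB K (x + y) (x - y) b && hs.all (withinB K x y)) := by
  induction hs generalizing b with
  | nil => simp
  | cons h t ih =>
      obtain ⟨hx, hy⟩ := h
      simp only [List.foldl_cons, List.all_cons, ih, hUpd, okB_upd, Bool.and_assoc]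

lemma innerA_eq (i : Int) (r : List Int) (js : List Int)
    (st : List (Int × Int) × List (Int × Int)) :
    js.foldl (fun st j =>
        if PySem.List.pyGetD r j 0 = 1 then (st.1 ++ [(i, j)], st.2)
        else if PySem.List.pyGetD r j 0 = 0 then (st.1, st.2 ++ [(i, j)])
        else st) st
      = (st.1 ++ hCells i r js, st.2 ++ eCells i r js) := by
  induction js generalizing st with
  | nil => simp [hCells, eCells]
  | cons j js ih =>
      by_cases h1 : PySem.List.pyGetD r j 0 = 1
      · simp [ih, hCells, eCells, h1]
      · by_cases h0 : PySem.List.pyGetD r j 0 = 0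
        · simp [ih, hCells, eCells, h0]
        · simp [ih, hCells, eCells, h1, h0]

lemma outerA_eq (A : List (List Int)) (M : Int) (cs : List Int)
    (st : List (Int × Int) × List (Int × Int)) :
    cs.foldl (fun st i =>
        (PySem.List.pyRange 0 M 1).foldl (fun st j =>
          if PySem.List.pyGetD (PySem.List.pyGetD A i []) j 0 = 1 then (st.1 ++ [(i, j)], st.2)
          else if PySem.List.pyGetD (PySem.List.pyGetD A i []) j 0 = 0 then (st.1, st.2 ++ [(i, j)])
          else st) st) st
      = (st.1 ++ cs.flatMap (fun i => hCells i (PySem.List.pyGetD A i []) (PySem.List.pyRange 0 M 1)),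
         st.2 ++ cs.flatMap (fun i => eCells i (PySem.List.pyGetD A i []) (PySem.List.pyRange 0 M 1))) := by
  induction cs generalizing st with
  | nil => simp
  | cons c cs ih => rw [List.foldl_cons, innerA_eq, ih]; simp [List.append_assoc]

lemma innerB1_eq (i : Int) (r : List Int) (js : List Int) (b : Option (Int × Int × Int × Int)) :
    js.foldl (fun b j => if PySem.List.pyGetD r j 0 = 1 then updB b (i + j) (i - j) else b) b
      = (hCells i r js).foldl hUpd b := by
  simp only [hCells, List.foldl_map, List.foldl_filter, hUpd, decide_eq_true_eq]

lemma bEq (A : List (List Int)) (M : Int) :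
    (PySem.List.enumerate A).foldl (fun b p =>
        (PySem.List.pyRange 0 M 1).foldl (fun b j =>
          if PySem.List.pyGetD p.2 j 0 = 1 then updB b (p.1 + j) (p.1 - j) else b) b) none
      = (housesOf A M).foldl hUpd none := by
  rw [PySem.List.enumerate_eq_map_pyRange A [], List.foldl_map, housesOf, List.foldl_flatMap]
  simp only [PySem.List.len_eq]
  exact PySem.List.foldl_congr_mem _ _ _ _ (fun b i _ => innerB1_eq i _ _ b)

lemma innerB2_eq (K : Int) (b : Option (Int × Int × Int × Int)) (i : Int) (r : List Int)
    (js : List Int) (cnt : Int) :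
    js.foldl (fun cnt j =>
        if PySem.List.pyGetD r j 0 = 0 then
          (if okB K (i + j) (i - j) b then cnt + 1 else cnt)
        else cnt) cnt
      = (eCells i r js).foldl (fun cnt p =>
          if okB K (p.1 + p.2) (p.1 - p.2) b then cnt + 1 else cnt) cnt := by
  simp only [eCells, List.foldl_map, List.foldl_filter]
  apply PySem.List.foldl_congr_mem
  intro cnt j _
  by_cases h0 : PySem.List.pyGetD r j 0 = 0
  · simp [h0]
  · simp [h0]

lemma cntEq (K : Int) (A : List (List Int)) (M : Int) (b : Option (Int × Int × Int × Int)) :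
    (PySem.List.enumerate A).foldl (fun (cnt : Int) p =>
        (PySem.List.pyRange 0 M 1).foldl (fun cnt j =>
          if PySem.List.pyGetD p.2 j 0 = 0 then
            (if okB K (p.1 + j) (p.1 - j) b then cnt + 1 else cnt)
          else cnt) cnt) (0 : Int)
      = (emptiesOf A M).foldl (fun cnt p =>
          if okB K (p.1 + p.2) (p.1 - p.2) b then cnt + 1 else cnt) (0 : Int) := by
  rw [PySem.List.enumerate_eq_map_pyRange A [], List.foldl_map, emptiesOf, List.foldl_flatMap]
  simp only [PySem.List.len_eq]
  exact PySem.List.foldl_congr_mem _ _ _ _ (fun cnt i _ => innerB2_eq K b i _ _ cnt)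

-- ===== VERDICT (by name: the statement is the Claim_ definition above) =====
theorem solution_spec : Claim_equal_solution := by
  intro K A _ _
  unfold Spec_solution
  dsimp only [solution, solution_alt]
  rw [outerA_eq A ((PySem.List.pyGetD A 0 []).length : Int) (PySem.List.pyRange 0 (A.length : Int) 1) ([], [])]
  rw [cntEq K A, bEq A]
  dsimp only
  simp only [List.nil_append, housesOf, emptiesOf]
  apply PySem.List.foldl_congr_mem
  intro cnt p _
  have h := okB_foldl K p.1 p.2 (housesOf A ((PySem.List.pyGetD A 0 []).length : Int)) none
  rw [show okB K (p.1 + p.2) (p.1 - p.2) none = true from rfl, Bool.true_and] at h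
  simp only [housesOf] at h
  simp only [checkHouses_eq_all, h]
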